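-- pv_equiv track=rewrite | github.com/SASD01/Threads-and-Process | Semana 1/main.py | validar_horario
-- ===== SOURCE A (Python) =====
-- def _contar_solapes(intervalos):
--     if len(intervalos) < 2:
--         return 0
--     intervalos.sort()
--     conflictos = 0
--     ultimo_fin = intervalos[0][1]
--     for inicio, fin in intervalos[1:]:
--         if inicio < ultimo_fin:
--             conflictos += 1
--             ultimo_fin = max(ultimo_fin, fin)
--         else:
--             ultimo_fin = fin
--     return conflictos
--
-- def validar_horario(horario, hora_max=21):
--     por_grupo = {}
--     por_salon = {}
--     fuera_jornada = 0
--     for grupo, salon, dia, inicio, fin in horario: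
--         if fin > hora_max:
--             fuera_jornada += 1
--         por_grupo.setdefault((dia, grupo), []).append((inicio, fin))
--         por_salon.setdefault((dia, salon), []).append((inicio, fin))
--     conflictos_grupo = sum(_contar_solapes(lst) for lst in por_grupo.values())
--     conflictos_salon = sum(_contar_solapes(lst) for lst in por_salon.values())
--     return conflictos_grupo + conflictos_salon + fuera_jornada
-- ===== SOURCE B (Python) =====
-- def _conflictos(intervalos):
--     xs = sorted(intervalos)
--     if not xs:
--         return 0
--     peaks = []
--     m = xs[0][1]
--     for _, f in xs:
--         m = max(m, f)
--         peaks.append(m)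
--     return sum(1 for (s, _), m in zip(xs[1:], peaks) if s < m)
--
--
-- def validar_horario(horario, hora_max=21):
--     def conflictos_por(key):
--         claves = list(dict.fromkeys(key(r) for r in horario))
--         return sum(_conflictos([(r[3], r[4]) for r in horario if key(r) == c])
--                    for c in claves)
--
--     fuera_jornada = sum(1 for r in horario if r[4] > hora_max)
--     return (conflictos_por(lambda r: (r[2], r[0]))
--             + conflictos_por(lambda r: (r[2], r[1]))
--             + fuera_jornada)
-- ===== Notes on version B (the rewrite author's own statement) =====
-- stated objective: alternative
-- what changed: B drops A's two setdefault-dicts and greedy merged-end sweep: it groups by the first-occurrence list of distinct (dia,key) keys with one filtered pass per key, and counts a bucket's conflicts by comparing each sorted interval's start against the prefix maximum of the earlier ends instead of A's stateful merged-block end (which resets on non-overlap); it trades dict bookkeeping for per-key passes (O(n*k) grouping vs A's O(n)).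
import Mathlib
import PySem

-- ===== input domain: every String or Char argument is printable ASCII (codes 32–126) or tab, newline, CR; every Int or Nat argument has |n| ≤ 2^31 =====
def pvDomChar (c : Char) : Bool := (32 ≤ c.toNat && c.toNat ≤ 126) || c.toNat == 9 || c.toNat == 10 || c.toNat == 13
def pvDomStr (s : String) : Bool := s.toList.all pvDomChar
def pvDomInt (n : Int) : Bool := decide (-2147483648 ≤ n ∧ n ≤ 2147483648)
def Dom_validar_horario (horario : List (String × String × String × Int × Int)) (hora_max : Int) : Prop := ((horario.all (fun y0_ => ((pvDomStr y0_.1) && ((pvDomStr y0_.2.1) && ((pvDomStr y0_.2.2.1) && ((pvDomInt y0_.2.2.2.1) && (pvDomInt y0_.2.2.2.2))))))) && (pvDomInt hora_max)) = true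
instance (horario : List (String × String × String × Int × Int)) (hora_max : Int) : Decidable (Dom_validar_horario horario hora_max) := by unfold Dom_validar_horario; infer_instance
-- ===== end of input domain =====

-- B regroups by first-occurrence distinct keys with per-key filters (no dicts) and counts
-- conflicts against a prefix-maximum-of-ends list instead of A's greedy merged-end state machine;
-- objective: alternative (same results by a different decomposition, not claimed faster).


-- ===== PORT A =====
-- _contar_solapes: sort, then greedy sweep keeping the merged block end 'ultimo_fin'
def contar_solapes (intervalos : List (Int × Int)) : Int :=
  if intervalos.length < 2 then 0
  else
    match PySem.List.sorted2 intervalos (fun p => p.1) (fun p => p.2) with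
    | [] => 0  -- unreachable: sorting preserves length ≥ 2
    | x0 :: rest =>
      (rest.foldl
        (fun (st : Int × Int) p =>
          if p.1 < st.2 then (st.1 + 1, max st.2 p.2) else (st.1, p.2))
        (0, x0.2)).1

def validar_horario (horario : List (String × String × String × Int × Int)) (hora_max : Int) : Int :=
  -- one loop filling por_grupo, por_salon and fuera_jornada (setdefault(k, []).append(v) = modify k [] (· ++ [v]))
  -- r unpacks as (grupo, salon, dia, inicio, fin) = (r.1, r.2.1, r.2.2.1, r.2.2.2.1, r.2.2.2.2)
  let st := horario.foldl
    (fun (s : PySem.Dict (String × String) (List (Int × Int)) × PySem.Dict (String × String) (List (Int × Int)) × Int) r =>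
      (s.1.modify (r.2.2.1, r.1) [] (fun l => l ++ [(r.2.2.2.1, r.2.2.2.2)]),
       s.2.1.modify (r.2.2.1, r.2.1) [] (fun l => l ++ [(r.2.2.2.1, r.2.2.2.2)]),
       if r.2.2.2.2 > hora_max then s.2.2 + 1 else s.2.2))
    (PySem.Dict.empty, PySem.Dict.empty, 0)
  let conflictos_grupo := (st.1.values.map contar_solapes).sum
  let conflictos_salon := (st.2.1.values.map contar_solapes).sum
  conflictos_grupo + conflictos_salon + st.2.2

-- ===== PORT B =====
-- _conflictos: sort, build the list of prefix maxima of the ends, count starts below the previous prefix maximum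
def conflictos_alt (intervalos : List (Int × Int)) : Int :=
  let xs := PySem.List.sorted2 intervalos (fun p => p.1) (fun p => p.2)
  match xs with
  | [] => 0
  | x0 :: _ =>
    let st := xs.foldl
      (fun (st : Int × List Int) p =>
        let m := max st.1 p.2
        (m, st.2 ++ [m]))
      (x0.2, [])
    (((xs.drop 1).zip st.2).countP (fun pm => decide (pm.1.1 < pm.2)) : Int)

-- conflictos_por(key): distinct keys in first-occurrence order, one filtered pass per key
def conflictos_por (horario : List (String × String × String × Int × Int))
    (key : (String × String × String × Int × Int) → String × String) : Int :=
  let claves := PySem.List.dedup (horario.map key)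
  (claves.map (fun c =>
    conflictos_alt ((horario.filter (fun r => key r == c)).map (fun r => (r.2.2.2.1, r.2.2.2.2))))).sum

def validar_horario_alt (horario : List (String × String × String × Int × Int)) (hora_max : Int) : Int :=
  let fuera_jornada : Int := (horario.countP (fun r => decide (r.2.2.2.2 > hora_max)) : Int)
  conflictos_por horario (fun r => (r.2.2.1, r.1))
    + conflictos_por horario (fun r => (r.2.2.1, r.2.1))
    + fuera_jornada

-- ===== PRECONDITION & SPEC =====
def Spec_validar_horario (horario : List (String × String × String × Int × Int)) (hora_max : Int) (out : Int) : Prop := out = validar_horario_alt horario hora_max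
instance (horario : List (String × String × String × Int × Int)) (hora_max : Int) (out : Int) : Decidable (Spec_validar_horario horario hora_max out) := by unfold Spec_validar_horario; infer_instance

-- ===== CLAIM (what is proved, stated in full; the proofs are below) =====
def Claim_equal_validar_horario : Prop := ∀ (horario : List (String × String × String × Int × Int)) (hora_max : Int), Dom_validar_horario horario hora_max → Spec_validar_horario horario hora_max (validar_horario horario hora_max)

-- ===== LEMMAS AND PROOFS =====

-- sorting pairs with tuple key (p.1, p.2) is sorting by the lexicographic order on Int × Int
theorem sorted2_eq_sorted_lex (xs : List (Int × Int)) :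
    PySem.List.sorted2 xs (fun p => p.1) (fun p => p.2)
      = PySem.List.sorted xs (fun p => (toLex (p.1, p.2) : Lex (Int × Int))) := by
  have hb : (fun (a b : Int × Int) => decide (a.1 < b.1) || (!decide (b.1 < a.1) && decide (a.2 < b.2)))
      = (fun (a b : Int × Int) => decide ((toLex (a.1, a.2) : Lex (Int × Int)) < toLex (b.1, b.2))) := by
    funext a b
    have hlex : ((toLex (a.1, a.2) : Lex (Int × Int)) < toLex (b.1, b.2))
        ↔ (a.1 < b.1 ∨ (a.1 = b.1 ∧ a.2 < b.2)) := by
      rw [Prod.Lex.lt_iff]; simp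
    rw [Bool.eq_iff_iff]
    simp only [Bool.or_eq_true, Bool.and_eq_true, Bool.not_eq_true', decide_eq_true_iff,
      decide_eq_false_iff_not, hlex]
    omega
  show List.foldl (fun acc x => PySem.List.insertBy
      (fun (a b : Int × Int) => decide (a.1 < b.1) || (!decide (b.1 < a.1) && decide (a.2 < b.2))) x acc) [] xs
    = List.foldl (fun acc x => PySem.List.insertBy
      (fun (a b : Int × Int) => decide ((toLex (a.1, a.2) : Lex (Int × Int)) < toLex (b.1, b.2))) x acc) [] xs
  rw [hb]

theorem sorted2_pairwise_fst (xs : List (Int × Int)) :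
    List.Pairwise (fun a b => a.1 ≤ b.1) (PySem.List.sorted2 xs (fun p => p.1) (fun p => p.2)) := by
  rw [sorted2_eq_sorted_lex]
  refine (PySem.List.sorted_pairwise xs (fun p => (toLex (p.1, p.2) : Lex (Int × Int)))).imp ?_
  intro a b hab
  rcases Prod.Lex.le_iff.mp hab with h1 | ⟨h1, _⟩ <;>
    simp only [ofLex_toLex] at h1
  · exact le_of_lt h1
  · exact le_of_eq h1

-- the common reference count: walk the sorted tail with the running maximum m of the ends seen so far
def prefCount : List (Int × Int) → Int → Int
  | [], _ => 0
  | p :: t, m => (if p.1 < m then 1 else 0) + prefCount t (max m p.2)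

-- A's greedy sweep computes prefCount on a start-sorted tail
theorem greedy_eq_prefCount (t : List (Int × Int)) :
    ∀ (c u m : Int), u ≤ m → (∀ p ∈ t, (p.1 < u ↔ p.1 < m)) →
    List.Pairwise (fun a b => a.1 ≤ b.1) t →
    (t.foldl
      (fun (st : Int × Int) p =>
        if p.1 < st.2 then (st.1 + 1, max st.2 p.2) else (st.1, p.2))
      (c, u)).1 = c + prefCount t m := by
  induction t with
  | nil => intro c u m _ _ _; simp [prefCount]
  | cons p t ih =>
    intro c u m hum hcond hpw
    have hhead := hcond p (List.mem_cons_self)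
    have hpw' := (List.pairwise_cons.mp hpw)
    simp only [List.foldl_cons, prefCount]
    by_cases hp : p.1 < u
    · rw [if_pos hp, if_pos (hhead.mp hp)]
      rw [ih (c + 1) (max u p.2) (max m p.2) (by omega) ?_ hpw'.2]
      · ring
      · intro q hq
        have h1 := hcond q (List.mem_cons_of_mem _ hq)
        constructor <;> intro h <;> omega
    · rw [if_neg hp, if_neg (fun h => hp (hhead.mpr h))]
      have hm_le : m ≤ p.1 := by
        by_contra h; exact (fun h' => hp (hhead.mpr h')) (by omega)
      rw [ih c p.2 (max m p.2) (by omega) ?_ hpw'.2]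
      · ring
      · intro q hq
        have h2 := hpw'.1 q hq
        constructor <;> intro h <;> omega

-- list of running maxima of the ends, seeded with m
def scanMax : Int → List (Int × Int) → List Int
  | _, [] => []
  | m, p :: t => max m p.2 :: scanMax (max m p.2) t

theorem foldl_snd_eq_scanMax (l : List (Int × Int)) :
    ∀ (m : Int) (acc : List Int),
    (l.foldl (fun (st : Int × List Int) p => (max st.1 p.2, st.2 ++ [max st.1 p.2])) (m, acc)).2
      = acc ++ scanMax m l := by
  induction l with
  | nil => intro m acc; simp [scanMax]
  | cons p t ih =>
    intro m acc
    simp only [List.foldl_cons, scanMax]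
    rw [ih]
    simp

theorem zip_scan_eq_prefCount (t : List (Int × Int)) :
    ∀ m : Int,
    (((t.zip (m :: scanMax m t)).countP (fun pm => decide (pm.1.1 < pm.2)) : Nat) : Int)
      = prefCount t m := by
  induction t with
  | nil => intro m; simp [prefCount]
  | cons p t ih =>
    intro m
    simp only [scanMax, List.zip_cons_cons, List.countP_cons, prefCount]
    rw [← ih (max m p.2)]
    by_cases h : p.1 < m <;> simp [h] <;> omega

-- the two per-bucket counters agree on every list
theorem conflictos_eq (xs : List (Int × Int)) : contar_solapes xs = conflictos_alt xs := by
  have hperm := PySem.List.sorted2_perm xs (fun p => p.1) (fun p => p.2) false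
  have hlen : (PySem.List.sorted2 xs (fun p => p.1) (fun p => p.2)).length = xs.length :=
    hperm.length_eq
  have hpw := sorted2_pairwise_fst xs
  simp only [contar_solapes, conflictos_alt]
  rcases h : PySem.List.sorted2 xs (fun p => p.1) (fun p => p.2) with _ | ⟨x0, rest⟩
  · rw [h] at hlen
    rw [if_pos (by simp at hlen; omega)]
  · rw [h] at hlen hpw
    by_cases hshort : xs.length < 2
    · rw [if_pos hshort]
      have hrest : rest = [] := by
        cases rest with
        | nil => rfl
        | cons a t => simp at hlen; omega
      subst hrest
      simp
    · rw [if_neg hshort]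
      simp only [List.foldl_cons, List.drop_succ_cons, List.drop_zero, max_self,
        List.nil_append]
      rw [foldl_snd_eq_scanMax rest x0.2 [x0.2]]
      simp only [List.cons_append, List.nil_append]
      rw [zip_scan_eq_prefCount rest x0.2]
      simpa using greedy_eq_prefCount rest 0 x0.2 x0.2 le_rfl (fun _ _ => Iff.rfl)
        (List.pairwise_cons.mp hpw).2

-- the values of A's setdefault/append dict are B's per-distinct-key filtered lists
theorem dict_values_eq_group (horario : List (String × String × String × Int × Int))
    (key : (String × String × String × Int × Int) → String × String) :
    (horario.foldl
      (fun (d : PySem.Dict (String × String) (List (Int × Int))) r =>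
        d.modify (key r) [] (fun l => l ++ [(r.2.2.2.1, r.2.2.2.2)]))
      PySem.Dict.empty).values
    = (PySem.List.dedup (horario.map key)).map (fun c =>
        (horario.filter (fun r => key r == c)).map (fun r => (r.2.2.2.1, r.2.2.2.2))) := by
  have hkeys := PySem.Dict.keys_foldl_modify_key horario key ([] : List (Int × Int))
    (fun _ r l => l ++ [(r.2.2.2.1, r.2.2.2.2)]) PySem.Dict.empty
  have hnodup := PySem.Dict.nodup_keys_foldl_modify_key horario key ([] : List (Int × Int))
    (fun _ r l => l ++ [(r.2.2.2.1, r.2.2.2.2)]) PySem.Dict.empty PySem.Dict.nodup_keys_empty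
  rw [PySem.Dict.values_eq_map_keys _ hnodup ([] : List (Int × Int)), hkeys,
    PySem.Dict.keys_empty, PySem.List.dedup_eq_ofList]
  have hset : PySem.Set.update ([] : List (String × String)) (horario.map key)
      = PySem.Set.ofList (horario.map key) := rfl
  rw [hset]
  refine List.map_congr_left ?_
  intro c _
  have hfold : horario.foldl
      (fun (d : PySem.Dict (String × String) (List (Int × Int))) r =>
        d.modify (key r) [] (fun l => l ++ [(r.2.2.2.1, r.2.2.2.2)])) PySem.Dict.empty
      = (horario.map (fun r => (key r, (r.2.2.2.1, r.2.2.2.2)))).foldl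
        (fun d p => d.modify p.1 [] (fun l => l ++ [p.2])) PySem.Dict.empty := by
    rw [List.foldl_map]
  rw [hfold, PySem.Dict.getD_foldl_modify_append, List.filter_map]
  simp [Function.comp_def]

-- ===== VERDICT (by name: the statement is the Claim_ definition above) =====
theorem validar_horario_spec : Claim_equal_validar_horario := by
  intro horario hora_max _
  unfold Spec_validar_horario
  simp only [validar_horario, validar_horario_alt, conflictos_por]
  have h2 : horario.foldl
      (fun (t : PySem.Dict (String × String) (List (Int × Int)) × Int) r =>
        (t.1.modify (r.2.2.1, r.2.1) [] (fun l => l ++ [(r.2.2.2.1, r.2.2.2.2)]),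
         if r.2.2.2.2 > hora_max then t.2 + 1 else t.2))
      (PySem.Dict.empty, (0 : Int))
      = (horario.foldl (fun (d : PySem.Dict (String × String) (List (Int × Int))) r =>
            d.modify (r.2.2.1, r.2.1) [] (fun l => l ++ [(r.2.2.2.1, r.2.2.2.2)])) PySem.Dict.empty,
         horario.foldl (fun (n : Int) r => if r.2.2.2.2 > hora_max then n + 1 else n) (0 : Int)) :=
    PySem.List.foldl_prod_mk
      (fun (d : PySem.Dict (String × String) (List (Int × Int))) r =>
        d.modify (r.2.2.1, r.2.1) [] (fun l => l ++ [(r.2.2.2.1, r.2.2.2.2)]))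
      (fun (n : Int) r => if r.2.2.2.2 > hora_max then n + 1 else n)
      horario PySem.Dict.empty (0 : Int)
  have hsplit : (horario.foldl
      (fun (s : PySem.Dict (String × String) (List (Int × Int)) × PySem.Dict (String × String) (List (Int × Int)) × Int) r =>
        (s.1.modify (r.2.2.1, r.1) [] (fun l => l ++ [(r.2.2.2.1, r.2.2.2.2)]),
         s.2.1.modify (r.2.2.1, r.2.1) [] (fun l => l ++ [(r.2.2.2.1, r.2.2.2.2)]),
         if r.2.2.2.2 > hora_max then s.2.2 + 1 else s.2.2))
      (PySem.Dict.empty, PySem.Dict.empty, 0))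
      = (horario.foldl (fun (d : PySem.Dict (String × String) (List (Int × Int))) r =>
            d.modify (r.2.2.1, r.1) [] (fun l => l ++ [(r.2.2.2.1, r.2.2.2.2)])) PySem.Dict.empty,
         horario.foldl (fun (d : PySem.Dict (String × String) (List (Int × Int))) r =>
            d.modify (r.2.2.1, r.2.1) [] (fun l => l ++ [(r.2.2.2.1, r.2.2.2.2)])) PySem.Dict.empty,
         horario.foldl (fun (n : Int) r => if r.2.2.2.2 > hora_max then n + 1 else n) (0 : Int)) :=
    (PySem.List.foldl_prod_mk
      (fun (d : PySem.Dict (String × String) (List (Int × Int))) r =>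
        d.modify (r.2.2.1, r.1) [] (fun l => l ++ [(r.2.2.2.1, r.2.2.2.2)]))
      (fun (t : PySem.Dict (String × String) (List (Int × Int)) × Int) r =>
        (t.1.modify (r.2.2.1, r.2.1) [] (fun l => l ++ [(r.2.2.2.1, r.2.2.2.2)]),
         if r.2.2.2.2 > hora_max then t.2 + 1 else t.2))
      horario PySem.Dict.empty (PySem.Dict.empty, (0 : Int))).trans
      (congrArg (fun x => (horario.foldl (fun (d : PySem.Dict (String × String) (List (Int × Int))) r =>
            d.modify (r.2.2.1, r.1) [] (fun l => l ++ [(r.2.2.2.1, r.2.2.2.2)])) PySem.Dict.empty, x)) h2)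
  rw [hsplit]
  have h3 : horario.foldl (fun (n : Int) r => if r.2.2.2.2 > hora_max then n + 1 else n) (0 : Int)
      = 0 + ((horario.countP (fun r => decide (r.2.2.2.2 > hora_max)) : Nat) : Int) :=
    PySem.List.foldl_ite_add_one (fun r => r.2.2.2.2 > hora_max) horario 0
  rw [dict_values_eq_group horario (fun r => (r.2.2.1, r.1)),
    dict_values_eq_group horario (fun r => (r.2.2.1, r.2.1)), h3]
  simp only [List.map_map, Function.comp_def, conflictos_eq, zero_add]
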